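-- pv_equiv track=rewrite | github.com/EricRobertBrewer/lectern | analyze/lectern/analyze/plot_util.py | get_ticks
-- ===== SOURCE A (Python) =====
-- def get_ticks(items, start=0, step=10):
--   ticks = list()
--   prev = None
--   n = start
--   for i, item in enumerate(items):
--     if prev is None or prev != item:
--       if n == 0:
--         ticks.append((i, item))
--         n = step - 1
--       else:
--         n -= 1
--       prev = item
--   return ticks
-- ===== SOURCE B (Python) =====
-- def get_ticks(items, start=0, step=10):
--     # Collect the (index, item) start of every run of equal consecutive items,
--     # then pick the run starts at positions start, start+step, ...
--     gs = []
--     prev = None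
--     for i, item in enumerate(items):
--         if prev is None or prev != item:
--             gs.append((i, item))
--         prev = item
--     return [gs[g] for g in range(start, len(gs), step)]
-- ===== Notes on version B (the rewrite author's own statement) =====
-- stated objective: alternative
-- what changed: A interleaves run detection and tick counting in one loop with a decrementing counter; B first collects the start of every run of equal consecutive items, then selects every step-th run start with range(start, len, step). Pre_ restricts to the natural tick domain 0 <= start and 1 <= step: negative start and nonpositive step are outside the function's purpose, where A's countdown accidentally yields an empty or one-element result.
-- outside the precondition, e.g. on get_ticks(['a', 'b'], -1, 2): A returns [], B returns [(1, 'b'), (1, 'b')]; on get_ticks(['a', 'b'], 0, 0): A returns [(0, 'a')], B raises ValueError; on get_ticks(['a', 'b'], 1, -1): A returns [(1, 'b')], B returns []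
import Mathlib
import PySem

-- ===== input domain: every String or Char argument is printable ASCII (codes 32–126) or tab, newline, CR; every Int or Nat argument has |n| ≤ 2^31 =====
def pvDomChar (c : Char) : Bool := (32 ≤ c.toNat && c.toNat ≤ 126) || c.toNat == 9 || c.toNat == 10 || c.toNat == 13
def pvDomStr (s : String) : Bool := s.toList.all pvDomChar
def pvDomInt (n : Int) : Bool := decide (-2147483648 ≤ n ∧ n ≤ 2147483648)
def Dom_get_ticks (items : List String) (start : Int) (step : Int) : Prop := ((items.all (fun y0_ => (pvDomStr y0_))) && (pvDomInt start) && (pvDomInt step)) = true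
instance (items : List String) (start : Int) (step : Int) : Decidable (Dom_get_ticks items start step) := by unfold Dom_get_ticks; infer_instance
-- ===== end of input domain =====

-- B: two-phase decomposition (collect run starts, then pick every step-th one by range); alternative, not faster.

-- ===== PORT A =====
-- A's single for-loop with state (ticks, prev, n) as structural recursion over items.
def aLoop (step : Int) : List String → Int → List (Int × String) → Option String → Int → List (Int × String)
  | [], _, ticks, _, _ => ticks
  | item :: rest, i, ticks, prev, n =>
    if prev = none ∨ prev ≠ some item then
      if n = 0 then aLoop step rest (i + 1) (ticks ++ [(i, item)]) (some item) (step - 1)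
      else aLoop step rest (i + 1) ticks (some item) (n - 1)
    else aLoop step rest (i + 1) ticks prev n

def get_ticks (items : List String) (start : Int) (step : Int) : List (Int × String) :=
  aLoop step items 0 [] none start

-- ===== PORT B =====
-- Pass 1 of Source B: the (index, item) start of every run of equal consecutive items.
def gsLoop : List String → Int → Option String → List (Int × String)
  | [], _, _ => []
  | item :: rest, i, prev =>
    if prev = none ∨ prev ≠ some item then (i, item) :: gsLoop rest (i + 1) (some item)
    else gsLoop rest (i + 1) (some item)

-- Pass 2 of Source B: '[gs[g] for g in range(start, len(gs), step)]'; the pyGetD default only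
-- totalizes gs[g] (under Pre_ every generated g is in range).
def get_ticks_alt (items : List String) (start : Int) (step : Int) : List (Int × String) :=
  let gs := gsLoop items 0 none
  (PySem.List.pyRange start (gs.length : Int) step).map (fun g => PySem.List.pyGetD gs g (0, ""))

-- ===== PRECONDITION & SPEC =====
-- Pre_ restricts to the natural tick domain: negative start and nonpositive step are outside the
-- function's purpose (A's countdown there accidentally yields an empty or one-element result; B's range raises
-- on step = 0 and selects differently otherwise).
def Pre_get_ticks (items : List String) (start : Int) (step : Int) : Prop := 0 ≤ start ∧ 1 ≤ step
instance (items : List String) (start : Int) (step : Int) : Decidable (Pre_get_ticks items start step) := by unfold Pre_get_ticks; infer_instance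

def pvWitness_get_ticks : List String × Int × Int := (["a", "a", "b", "c"], 0, 2)

def Spec_get_ticks (items : List String) (start : Int) (step : Int) (out : List (Int × String)) : Prop := out = get_ticks_alt items start step
instance (items : List String) (start : Int) (step : Int) (out : List (Int × String)) : Decidable (Spec_get_ticks items start step out) := by unfold Spec_get_ticks; infer_instance

-- ===== CLAIM (what is proved, stated in full; the proofs are below) =====
def Claim_equal_get_ticks : Prop := ∀ (items : List String) (start : Int) (step : Int), Dom_get_ticks items start step → Pre_get_ticks items start step → Spec_get_ticks items start step (get_ticks items start step)

-- ===== LEMMAS AND PROOFS =====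

-- Abstract selection: walk the group-start list with A's counter.
def select (step : Int) : List (Int × String) → Int → List (Int × String)
  | [], _ => []
  | x :: xs, n => if n = 0 then x :: select step xs (step - 1) else select step xs (n - 1)

theorem aLoop_eq_select (step : Int) :
    ∀ (items : List String) (i : Int) (ticks : List (Int × String)) (prev : Option String) (n : Int),
      aLoop step items i ticks prev n = ticks ++ select step (gsLoop items i prev) n := by
  intro items
  induction items with
  | nil => intro i ticks prev n; simp [aLoop, gsLoop, select]
  | cons item rest ih =>
    intro i ticks prev n
    by_cases hc : prev = none ∨ prev ≠ some item
    · by_cases hn : n = 0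
      · simp [aLoop, gsLoop, hc, hn, select, ih]
      · simp [aLoop, gsLoop, hc, hn, select, ih]
    · have hp : prev = some item := by
        rcases prev with _ | p
        · exact absurd (Or.inl rfl) hc
        · push_neg at hc; exact hc.2
      simp [aLoop, gsLoop, hp, ih]

theorem pyRange_pos_cons (a b s : Int) (hab : a < b) (hs : 0 < s) :
    PySem.List.pyRange a b s = a :: PySem.List.pyRange (a + s) b s := by
  rw [PySem.List.pyRange_of_pos a b hs, PySem.List.pyRange_of_pos (a + s) b hs]
  have hcount : (if a < b then ((b - a + s - 1) / s).toNat else 0) =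
      (if a + s < b then ((b - (a + s) + s - 1) / s).toNat else 0) + 1 := by
    rw [if_pos hab]
    by_cases h2 : a + s < b
    · rw [if_pos h2]
      have he : b - a + s - 1 = (b - (a + s) + s - 1) + 1 * s := by ring
      rw [he, Int.add_mul_ediv_right _ _ (by omega : s ≠ 0)]
      have hnn : 0 ≤ (b - (a + s) + s - 1) / s := Int.ediv_nonneg (by omega) (by omega)
      omega
    · rw [if_neg h2]
      have he : b - a + s - 1 = (b - a - 1) + 1 * s := by ring
      rw [he, Int.add_mul_ediv_right _ _ (by omega : s ≠ 0)]
      have hz : (b - a - 1) / s = 0 := Int.ediv_eq_zero_of_lt (by omega) (by omega)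
      omega
  rw [hcount, List.range_succ_eq_map, List.map_cons, List.map_map]
  congr 1
  · simp
  · apply List.map_congr_left
    intro k _
    simp only [Function.comp_apply, Nat.succ_eq_add_one]
    push_cast
    ring

theorem pyRange_pos_shift (a b s : Int) (hs : 0 < s) :
    PySem.List.pyRange (a + 1) (b + 1) s = (PySem.List.pyRange a b s).map (· + 1) := by
  rw [PySem.List.pyRange_of_pos _ _ hs, PySem.List.pyRange_of_pos _ _ hs]
  have h1 : (b + 1 - (a + 1) + s - 1) = (b - a + s - 1) := by ring
  have hiff : a + 1 < b + 1 ↔ a < b := by omega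
  rw [h1]
  simp only [hiff, List.map_map]
  apply List.map_congr_left
  intro k _
  simp only [Function.comp_apply]
  ring

theorem select_eq_map_pyRange (step : Int) (hstep : 1 ≤ step) :
    ∀ (gs : List (Int × String)) (n : Int), 0 ≤ n →
      select step gs n =
        (PySem.List.pyRange n (gs.length : Int) step).map (fun g => PySem.List.pyGetD gs g (0, "")) := by
  intro gs
  induction gs with
  | nil =>
    intro n hn
    have hnlt : ¬ n < ((([] : List (Int × String)).length : Nat) : Int) := by simp; omega
    rw [PySem.List.pyRange_of_pos _ _ (by omega : (0:Int) < step), if_neg hnlt]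
    simp [select]
  | cons x xs ih =>
    intro n hn
    have hshift : ∀ (m : Int), 0 ≤ m →
        (PySem.List.pyRange (m + 1) ((xs.length : Int) + 1) step).map
            (fun g => PySem.List.pyGetD (x :: xs) g (0, "")) =
        (PySem.List.pyRange m (xs.length : Int) step).map
            (fun g => PySem.List.pyGetD xs g (0, "")) := by
      intro m hm
      rw [pyRange_pos_shift _ _ _ (by omega), List.map_map]
      apply List.map_congr_left
      intro g hg
      have hg0 : m ≤ g := ((PySem.List.mem_pyRange_iff_of_pos (by omega) g).mp hg).1
      obtain ⟨k, rfl⟩ : ∃ k : Nat, g = (k : Int) := ⟨g.toNat, by omega⟩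
      have hk1 : (k : Int) + 1 = ((k + 1 : Nat) : Int) := by push_cast; ring
      simp only [Function.comp_apply, hk1, PySem.List.pyGetD_natCast]
      simp [List.getD]
    have e2 : (((x :: xs).length : Nat) : Int) = (xs.length : Int) + 1 := by
      push_cast [List.length_cons]; ring
    by_cases h0 : n = 0
    · subst h0
      have hlt : (0 : Int) < (((x :: xs).length : Nat) : Int) := by rw [e2]; omega
      rw [pyRange_pos_cons _ _ _ hlt (by omega), List.map_cons]
      have hl : select step (x :: xs) 0 = x :: select step xs (step - 1) := by simp [select]
      have hx : PySem.List.pyGetD (x :: xs) (0 : Int) (0, "") = x := by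
        have : ((0 : Nat) : Int) = (0 : Int) := by norm_num
        rw [← this, PySem.List.pyGetD_natCast]; simp
      rw [hl, hx]
      congr 1
      have e1 : (0 : Int) + step = (step - 1) + 1 := by ring
      rw [e1, e2, hshift (step - 1) (by omega), ← ih (step - 1) (by omega)]
    · have hl : select step (x :: xs) n = select step xs (n - 1) := by simp [select, h0]
      rw [hl, ih (n - 1) (by omega)]
      have e3 : (n - 1) + 1 = n := by ring
      rw [← hshift (n - 1) (by omega), e3, ← e2]

-- ===== VERDICT (by name: the statement is the Claim_ definition above) =====
theorem get_ticks_spec : Claim_equal_get_ticks := by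
  intro items start step _ hpre
  show get_ticks items start step = get_ticks_alt items start step
  unfold get_ticks get_ticks_alt
  rw [aLoop_eq_select]
  simp only [List.nil_append]
  exact select_eq_map_pyRange step hpre.2 (gsLoop items 0 none) start hpre.1
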